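-- pv_equiv track=rewrite | github.com/Fatou1993/Cracking-The-Coding-Interview-Python-Solutions | moderate/subSort.py | subSort
-- ===== SOURCE A (Python) =====
-- def subSort(nums):
--     """
--
--     :param nums:
--     :return:
--     """
--     size = len(nums)
--     if size <= 1 : return None #array already sorted
--     startE = float('inf')
--     n = 0
--     prevE = nums[0]
--     for i in range(1,size):
--         if nums[i] < prevE :
--             startE = min(startE, nums[i])
--             n = i
--         else:
--             prevE = nums[i]
--     if startE == float('inf'): #array already sorted
--         return None
--     m = 0
--     while m < size and nums[m] <= startE :
--         m+=1
--     return (m, n)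
-- ===== SOURCE B (Python) =====
-- def subSort(nums):
--     size = len(nums)
--     if size <= 1:
--         return None
--     end = 0
--     maxv = nums[0]
--     for i in range(1, size):
--         if nums[i] < maxv:
--             end = i
--         else:
--             maxv = nums[i]
--     if end == 0:
--         return None
--     start = 0
--     minv = nums[size - 1]
--     for i in range(size - 2, -1, -1):
--         if nums[i] > minv:
--             start = i
--         else:
--             minv = nums[i]
--     return (start, end)
-- ===== Notes on version B (the rewrite author's own statement) =====
-- stated objective: idiomatic
-- what changed: A finds the minimum misplaced value during its forward pass and then re-scans the prefix with a while loop to locate the left boundary; B uses the canonical two-directional-pass algorithm: a forward running-max pass for the right boundary and a separate backward running-min pass for the left boundary.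
import Mathlib
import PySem

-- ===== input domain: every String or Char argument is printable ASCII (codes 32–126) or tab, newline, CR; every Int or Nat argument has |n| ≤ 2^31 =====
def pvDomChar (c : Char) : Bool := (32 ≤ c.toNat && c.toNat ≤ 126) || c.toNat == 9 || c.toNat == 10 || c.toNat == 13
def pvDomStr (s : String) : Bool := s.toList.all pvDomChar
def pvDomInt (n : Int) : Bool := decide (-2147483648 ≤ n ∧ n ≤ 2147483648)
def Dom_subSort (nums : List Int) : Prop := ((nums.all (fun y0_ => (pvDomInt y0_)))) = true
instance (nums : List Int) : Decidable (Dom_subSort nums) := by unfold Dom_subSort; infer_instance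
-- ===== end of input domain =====

-- B replaces A's "min misplaced value, then prefix scan" with the canonical two
-- directional passes (forward running max for the right boundary, backward running
-- min for the left boundary); objective: idiomatic, same linear-pass cost.

-- ===== PORT A =====
-- Python's min(startE, x) where startE starts as float('inf'); none models inf
def pyMinInf (s : Option Int) (x : Int) : Int :=
  match s with
  | none => x
  | some e => min e x

-- body of A's 'for i in range(1, size)' loop, state (startE, n, prevE)
def subSortStep (nums : List Int) (s : Option Int × Int × Int) (i : Int) : Option Int × Int × Int :=
  if PySem.List.pyGetD nums i 0 < s.2.2 then
    (some (pyMinInf s.1 (PySem.List.pyGetD nums i 0)), i, s.2.2)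
  else
    (s.1, s.2.1, PySem.List.pyGetD nums i 0)

-- A's 'while m < size and nums[m] <= startE: m += 1' (fuel = size bounds the iterations)
def subSortWhile (nums : List Int) (startE : Int) : Nat → Int → Int
  | 0, m => m
  | fuel+1, m =>
    if m < (nums.length : Int) ∧ PySem.List.pyGetD nums m 0 ≤ startE then
      subSortWhile nums startE fuel (m + 1)
    else m

def subSort (nums : List Int) : Option (Int × Int) :=
  if (nums.length : Int) ≤ 1 then none
  else
    let st := (PySem.List.pyRange 1 (nums.length : Int) 1).foldl (subSortStep nums)
                (none, 0, PySem.List.pyGetD nums 0 0)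
    match st.1 with
    | none => none
    | some startE => some (subSortWhile nums startE nums.length 0, st.2.1)

-- ===== PORT B =====
-- forward pass: running max, remember last index below it
def subSortFwd (nums : List Int) (s : Int × Int) (i : Int) : Int × Int :=
  if PySem.List.pyGetD nums i 0 < s.2 then (i, s.2) else (s.1, PySem.List.pyGetD nums i 0)

-- backward pass: running min, remember last index above it
def subSortBwd (nums : List Int) (s : Int × Int) (i : Int) : Int × Int :=
  if PySem.List.pyGetD nums i 0 > s.2 then (i, s.2) else (s.1, PySem.List.pyGetD nums i 0)

def subSort_alt (nums : List Int) : Option (Int × Int) :=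
  if (nums.length : Int) ≤ 1 then none
  else
    let fw := (PySem.List.pyRange 1 (nums.length : Int) 1).foldl (subSortFwd nums)
                (0, PySem.List.pyGetD nums 0 0)
    if fw.1 = 0 then none
    else
      let bw := (PySem.List.pyRange ((nums.length : Int) - 2) (-1) (-1)).foldl (subSortBwd nums)
                  (0, PySem.List.pyGetD nums ((nums.length : Int) - 1) 0)
      some (bw.1, fw.1)

-- ===== PRECONDITION & SPEC =====
def Spec_subSort (nums : List Int) (out : Option (Int × Int)) : Prop := out = subSort_alt nums
instance (nums : List Int) (out : Option (Int × Int)) : Decidable (Spec_subSort nums out) := by unfold Spec_subSort; infer_instance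

-- ===== CLAIM (what is proved, stated in full; the proofs are below) =====
def Claim_equal_subSort : Prop := ∀ (nums : List Int), Dom_subSort nums → Spec_subSort nums (subSort nums)

-- ===== LEMMAS AND PROOFS =====

-- "index j holds a misplaced value": some earlier element is larger
def Misp (nums : List Int) (j : Int) : Prop :=
  ∃ i : Int, 0 ≤ i ∧ i < j ∧ PySem.List.pyGetD nums j 0 < PySem.List.pyGetD nums i 0

-- A's forward-loop state after processing indices 1..k-1
def fwdSt (nums : List Int) (k : Nat) : Option Int × Int × Int :=
  (PySem.List.pyRange 1 (k : Int) 1).foldl (subSortStep nums) (none, 0, PySem.List.pyGetD nums 0 0)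

-- A's forward loop and B's forward loop run in lockstep
lemma fwd_rel (nums : List Int) :
    ∀ (l : List Int), (∀ i ∈ l, 1 ≤ i) → ∀ (sE : Option Int) (n prev : Int), (sE = none ↔ n = 0) →
      (l.foldl (subSortStep nums) (sE, n, prev)).2.1 = (l.foldl (subSortFwd nums) (n, prev)).1 ∧
      (l.foldl (subSortStep nums) (sE, n, prev)).2.2 = (l.foldl (subSortFwd nums) (n, prev)).2 ∧
      ((l.foldl (subSortStep nums) (sE, n, prev)).1 = none ↔
        (l.foldl (subSortFwd nums) (n, prev)).1 = 0) := by
  intro l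
  induction l with
  | nil => intro _ sE n prev h; exact ⟨rfl, rfl, h⟩
  | cons x xs ih =>
    intro hmem sE n prev h
    have hx1 : (1:Int) ≤ x := hmem x (by simp)
    have hmem' : ∀ i ∈ xs, (1:Int) ≤ i := fun i hi => hmem i (by simp [hi])
    simp only [List.foldl_cons, subSortStep, subSortFwd]
    by_cases hx : PySem.List.pyGetD nums x 0 < prev
    · rw [if_pos hx, if_pos hx]
      exact ih hmem' _ x prev ⟨fun hc => by simp at hc, fun hc => absurd hc (by omega)⟩
    · rw [if_neg hx, if_neg hx]
      exact ih hmem' sE n _ h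

-- semantic invariant of A's forward loop: prev is the running max, startE the
-- minimum misplaced value (none while there is none)
lemma fwd_inv (nums : List Int) :
    ∀ (k : Nat), 1 ≤ k →
    (∀ j : Int, 0 ≤ j → j < (k : Int) → PySem.List.pyGetD nums j 0 ≤ (fwdSt nums k).2.2) ∧
    (∃ j : Int, 0 ≤ j ∧ j < (k : Int) ∧ PySem.List.pyGetD nums j 0 = (fwdSt nums k).2.2) ∧
    ((fwdSt nums k).1 = none ↔ ∀ j : Int, 1 ≤ j → j < (k : Int) → ¬ Misp nums j) ∧
    (∀ E : Int, (fwdSt nums k).1 = some E →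
      (∀ j : Int, 1 ≤ j → j < (k : Int) → Misp nums j → E ≤ PySem.List.pyGetD nums j 0) ∧
      (∃ t : Int, 1 ≤ t ∧ t < (k : Int) ∧ Misp nums t ∧ PySem.List.pyGetD nums t 0 = E)) := by
  intro k hk
  induction k, hk using Nat.le_induction with
  | base =>
    have h1 : fwdSt nums 1 = (none, 0, PySem.List.pyGetD nums 0 0) := by
      unfold fwdSt
      rw [PySem.List.pyRange_one_eq_nil (by simp)]
      rfl
    rw [h1]
    refine ⟨?_, ⟨0, by omega, by simp, rfl⟩, ?_, ?_⟩
    · intro j h0 hj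
      have : j = 0 := by simp at hj; omega
      rw [this]
    · exact iff_of_true rfl (by intro j h1' h2'; simp at h2'; omega)
    · intro E hE; simp at hE
  | succ k hk1 ih =>
    have hc : PySem.List.pyRange 1 ((k+1 : Nat) : Int) 1 =
        PySem.List.pyRange 1 (k : Int) 1 ++ [(k : Int)] := by
      push_cast
      rw [PySem.List.pyRange_one_succ_right (by exact_mod_cast hk1)]
    have hstep : fwdSt nums (k+1) = subSortStep nums (fwdSt nums k) (k : Int) := by
      unfold fwdSt
      rw [hc, List.foldl_append]
      rfl
    obtain ⟨C1, ⟨j0, hj0a, hj0b, hj0c⟩, C3, C4⟩ := ih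
    rcases hskt : fwdSt nums k with ⟨sE, n, prev⟩
    rw [hskt] at C1 hj0c C3 C4 hstep
    dsimp only at C1 hj0c C3 C4
    simp only [subSortStep] at hstep
    by_cases hx : PySem.List.pyGetD nums (k : Int) 0 < prev
    · rw [if_pos hx] at hstep
      have hMk : Misp nums (k : Int) := ⟨j0, hj0a, hj0b, by omega⟩
      rcases hsE : sE with _ | e
      · rw [hsE] at hstep C3 C4
        simp only [pyMinInf] at hstep
        have hnone := C3.mp rfl
        rw [hstep]
        refine ⟨?_, ⟨j0, hj0a, by push_cast; omega, hj0c⟩, ?_, ?_⟩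
        · intro j h0 hj
          show PySem.List.pyGetD nums j 0 ≤ prev
          push_cast at hj
          rcases lt_or_eq_of_le (by omega : j ≤ (k : Int)) with h | h
          · exact C1 j h0 h
          · subst h; omega
        · exact iff_of_false (by simp)
            (fun hall => hall (k : Int) (by exact_mod_cast hk1) (by push_cast; omega) hMk)
        · intro E hE
          have hEv : PySem.List.pyGetD nums (k : Int) 0 = E := Option.some.inj hE
          refine ⟨?_, ⟨(k : Int), by exact_mod_cast hk1, by push_cast; omega, hMk, hEv⟩⟩
          intro j hj1 hjk hjM
          push_cast at hjk
          rcases lt_or_eq_of_le (by omega : j ≤ (k : Int)) with h | h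
          · exact absurd hjM (hnone j hj1 h)
          · subst h; omega
      · rw [hsE] at hstep C3 C4
        simp only [pyMinInf] at hstep
        obtain ⟨P1e, te, hte1, htek, hteM, hteE⟩ := C4 e rfl
        rw [hstep]
        refine ⟨?_, ⟨j0, hj0a, by push_cast; omega, hj0c⟩, ?_, ?_⟩
        · intro j h0 hj
          show PySem.List.pyGetD nums j 0 ≤ prev
          push_cast at hj
          rcases lt_or_eq_of_le (by omega : j ≤ (k : Int)) with h | h
          · exact C1 j h0 h
          · subst h; omega
        · exact iff_of_false (by simp)
            (fun hall => hall (k : Int) (by exact_mod_cast hk1) (by push_cast; omega) hMk)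
        · intro E hE
          have hEv : min e (PySem.List.pyGetD nums (k : Int) 0) = E := Option.some.inj hE
          constructor
          · intro j hj1 hjk hjM
            push_cast at hjk
            rcases lt_or_eq_of_le (by omega : j ≤ (k : Int)) with h | h
            · have h1 := P1e j hj1 h hjM
              have h2 : min e (PySem.List.pyGetD nums (k : Int) 0) ≤ e := min_le_left _ _
              omega
            · subst h
              have h2 : min e (PySem.List.pyGetD nums (k : Int) 0) ≤
                  PySem.List.pyGetD nums (k : Int) 0 := min_le_right _ _
              omega
          · rcases le_total e (PySem.List.pyGetD nums (k : Int) 0) with h | h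
            · refine ⟨te, hte1, by push_cast; omega, hteM, ?_⟩
              rw [hteE, ← hEv, min_eq_left h]
            · refine ⟨(k : Int), by exact_mod_cast hk1, by push_cast; omega, hMk, ?_⟩
              rw [← hEv, min_eq_right h]
    · rw [if_neg hx] at hstep
      have hprev : prev ≤ PySem.List.pyGetD nums (k : Int) 0 := by omega
      have hnM : ¬ Misp nums (k : Int) := by
        rintro ⟨i, hi0, hik, hlt⟩
        have := C1 i hi0 hik
        omega
      rw [hstep]
      refine ⟨?_, ⟨(k : Int), by omega, by push_cast; omega, rfl⟩, ?_, ?_⟩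
      · intro j h0 hj
        show PySem.List.pyGetD nums j 0 ≤ PySem.List.pyGetD nums (k : Int) 0
        push_cast at hj
        rcases lt_or_eq_of_le (by omega : j ≤ (k : Int)) with h | h
        · have := C1 j h0 h; omega
        · subst h; omega
      · constructor
        · intro hone j hj1 hjk
          push_cast at hjk
          rcases lt_or_eq_of_le (by omega : j ≤ (k : Int)) with h | h
          · exact C3.mp hone j hj1 h
          · subst h; exact hnM
        · intro hall
          exact C3.mpr (fun j hj1 hjk => hall j hj1 (by push_cast; omega))
      · intro E hE
        obtain ⟨P1e, te, hte1, htek, hteM, hteE⟩ := C4 E hE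
        refine ⟨?_, ⟨te, hte1, by push_cast; omega, hteM, hteE⟩⟩
        intro j hj1 hjk hjM
        push_cast at hjk
        rcases lt_or_eq_of_le (by omega : j ≤ (k : Int)) with h | h
        · exact P1e j hj1 h hjM
        · subst h; exact absurd hjM hnM

-- takeWhile facts (Nat-indexed, via getD)
lemma takeWhile_len_le (p : Int → Bool) :
    ∀ (l : List Int), (l.takeWhile p).length ≤ l.length := by
  intro l
  induction l with
  | nil => simp
  | cons x xs ih =>
    by_cases hx : p x
    · simp only [List.takeWhile, hx, List.length_cons]; omega
    · simp [List.takeWhile, hx]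

lemma takeWhile_getD (p : Int → Bool) :
    ∀ (l : List Int) (j : Nat), j < (l.takeWhile p).length → p (l.getD j 0) = true := by
  intro l
  induction l with
  | nil => intro j h; simp [List.takeWhile] at h
  | cons x xs ih =>
    intro j h
    by_cases hx : p x
    · cases j with
      | zero => simpa [List.getD] using hx
      | succ j => exact ih j (by simpa [List.takeWhile, hx] using h)
    · simp [List.takeWhile, hx] at h

lemma takeWhile_stop (p : Int → Bool) :
    ∀ (l : List Int), (l.takeWhile p).length < l.length →
      p (l.getD (l.takeWhile p).length 0) = false := by
  intro l
  induction l with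
  | nil => intro h; simp at h
  | cons x xs ih =>
    intro h
    by_cases hx : p x
    · simpa [List.takeWhile, hx, List.getD] using ih (by simpa [List.takeWhile, hx] using h)
    · simp [List.takeWhile, hx, List.getD]

-- A's while loop counts the prefix of elements ≤ E
lemma while_eq (nums : List Int) (E : Int) :
    ∀ (fuel m : Nat), (nums.takeWhile (fun x => decide (x ≤ E))).length ≤ m + fuel →
      m ≤ (nums.takeWhile (fun x => decide (x ≤ E))).length →
      subSortWhile nums E fuel (m : Int) =
        ((nums.takeWhile (fun x => decide (x ≤ E))).length : Int) := by
  intro fuel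
  induction fuel with
  | zero =>
    intro m h1 h2
    have : m = (nums.takeWhile (fun x => decide (x ≤ E))).length := by omega
    rw [subSortWhile, this]
  | succ fuel ih =>
    intro m h1 h2
    have htwle := takeWhile_len_le (fun x => decide (x ≤ E)) nums
    rw [subSortWhile]
    by_cases hm : m < (nums.takeWhile (fun x => decide (x ≤ E))).length
    · have hc1 : (m : Int) < (nums.length : Int) := by exact_mod_cast lt_of_lt_of_le hm htwle
      have hc2 : PySem.List.pyGetD nums (m : Int) 0 ≤ E := by
        have h3 := takeWhile_getD (fun x => decide (x ≤ E)) nums m hm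
        rw [decide_eq_true_eq] at h3
        rwa [PySem.List.pyGetD_natCast]
      rw [if_pos ⟨hc1, hc2⟩]
      have hcast : ((m : Int) + 1) = ((m + 1 : Nat) : Int) := by push_cast; ring
      rw [hcast]
      exact ih (m+1) (by omega) (by omega)
    · have hmtw : m = (nums.takeWhile (fun x => decide (x ≤ E))).length := by omega
      have hcond : ¬ ((m : Int) < (nums.length : Int) ∧ PySem.List.pyGetD nums (m : Int) 0 ≤ E) := by
        rcases Nat.lt_or_ge m nums.length with hlen | hlen
        · have h3 := takeWhile_stop (fun x => decide (x ≤ E)) nums (hmtw ▸ hlen)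
          rw [← hmtw, decide_eq_false_iff_not] at h3
          rintro ⟨_, hc⟩
          rw [PySem.List.pyGetD_natCast] at hc
          exact h3 hc
        · rintro ⟨hc, _⟩
          have : (nums.length : Int) ≤ (m : Int) := by exact_mod_cast hlen
          omega
      rw [if_neg hcond, hmtw]

-- suffix-min invariant of B's backward fold
lemma bw_minv (nums : List Int) :
    ∀ (n : Nat) (a b : Int), a - b = (n : Int) → ∀ (s v : Int),
      (((PySem.List.pyRange a b (-1)).foldl (subSortBwd nums) (s, v)).2 ≤ v ∧
       (∀ j : Int, b < j → j ≤ a →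
          ((PySem.List.pyRange a b (-1)).foldl (subSortBwd nums) (s, v)).2 ≤ PySem.List.pyGetD nums j 0) ∧
       (((PySem.List.pyRange a b (-1)).foldl (subSortBwd nums) (s, v)).2 = v ∨
        ∃ j : Int, b < j ∧ j ≤ a ∧
          ((PySem.List.pyRange a b (-1)).foldl (subSortBwd nums) (s, v)).2 = PySem.List.pyGetD nums j 0)) := by
  intro n
  induction n with
  | zero =>
    intro a b hab s v
    rw [PySem.List.pyRange_neg_one_eq_nil (by omega)]
    exact ⟨le_refl v, fun j h1 h2 => absurd (h1.trans_le h2) (by omega), Or.inl rfl⟩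
  | succ n ih =>
    intro a b hab s v
    have hba : b < a := by omega
    rw [PySem.List.pyRange_neg_one_cons hba, List.foldl_cons]
    simp only [subSortBwd]
    by_cases hga : PySem.List.pyGetD nums a 0 > v
    · rw [if_pos hga]
      obtain ⟨h1, h2, h3⟩ := ih (a-1) b (by omega) a v
      refine ⟨h1, ?_, ?_⟩
      · intro j hbj hja
        rcases lt_or_eq_of_le hja with h | h
        · exact h2 j hbj (by omega)
        · subst h; omega
      · rcases h3 with h | ⟨j, hj1, hj2, hj3⟩
        · exact Or.inl h
        · exact Or.inr ⟨j, hj1, by omega, hj3⟩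
    · rw [if_neg hga]
      obtain ⟨h1, h2, h3⟩ := ih (a-1) b (by omega) s (PySem.List.pyGetD nums a 0)
      refine ⟨by omega, ?_, ?_⟩
      · intro j hbj hja
        rcases lt_or_eq_of_le hja with h | h
        · exact h2 j hbj (by omega)
        · subst h; omega
      · rcases h3 with h | ⟨j, hj1, hj2, hj3⟩
        · exact Or.inr ⟨a, hba, le_refl a, h⟩
        · exact Or.inr ⟨j, hj1, by omega, hj3⟩

-- if every pending element is below the running min and below all later pending ones,
-- the backward fold never updates its first component
lemma bw_nofire (nums : List Int) :
    ∀ (n : Nat) (a b : Int), a - b = (n : Int) → ∀ (s v : Int),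
      (∀ i : Int, b < i → i ≤ a →
        (PySem.List.pyGetD nums i 0 ≤ v ∧
         ∀ j : Int, i < j → j ≤ a → PySem.List.pyGetD nums i 0 ≤ PySem.List.pyGetD nums j 0)) →
      ((PySem.List.pyRange a b (-1)).foldl (subSortBwd nums) (s, v)).1 = s := by
  intro n
  induction n with
  | zero =>
    intro a b hab s v _
    rw [PySem.List.pyRange_neg_one_eq_nil (by omega)]
    rfl
  | succ n ih =>
    intro a b hab s v H
    have hba : b < a := by omega
    rw [PySem.List.pyRange_neg_one_cons hba, List.foldl_cons]
    simp only [subSortBwd]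
    have hga : ¬ (PySem.List.pyGetD nums a 0 > v) := by
      have := (H a hba (le_refl a)).1; omega
    rw [if_neg hga]
    exact ih (a-1) b (by omega) s (PySem.List.pyGetD nums a 0)
      (fun i hbi hia =>
        ⟨(H i hbi (by omega)).2 a (by omega) (le_refl a),
         fun j hij hja => (H i hbi (by omega)).2 j hij (by omega)⟩)

-- split a countdown range at a point
lemma bw_split (a b c : Int) (h1 : c ≤ b) (h2 : b ≤ a) :
    PySem.List.pyRange a c (-1) =
      PySem.List.pyRange a b (-1) ++ PySem.List.pyRange b c (-1) := by
  rw [PySem.List.pyRange_neg_one_eq_reverse, PySem.List.pyRange_neg_one_eq_reverse,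
      PySem.List.pyRange_neg_one_eq_reverse,
      PySem.List.pyRange_one_append (c+1) (b+1) (a+1) (by omega) (by omega)]
  simp

-- ===== VERDICT (by name: the statement is the Claim_ definition above) =====
theorem subSort_spec : Claim_equal_subSort := by
  intro nums _
  show subSort nums = subSort_alt nums
  by_cases hL1 : (nums.length : Int) ≤ 1
  · simp only [subSort, subSort_alt, if_pos hL1]
  · have hL2 : 2 ≤ nums.length := by omega
    have hmem : ∀ i ∈ PySem.List.pyRange 1 (nums.length : Int) 1, (1:Int) ≤ i := by
      intro i hi; exact (PySem.List.mem_pyRange_one.mp hi).1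
    obtain ⟨hrel1, _, hrel3⟩ := fwd_rel nums (PySem.List.pyRange 1 (nums.length : Int) 1)
      hmem none 0 (PySem.List.pyGetD nums 0 0) (by simp)
    simp only [subSort, if_neg hL1]
    split
    · rename_i hE
      simp only [subSort_alt, if_neg hL1]
      rw [if_pos (hrel3.mp hE)]
    · rename_i E hE
      have hne : ((PySem.List.pyRange 1 (nums.length : Int) 1).foldl (subSortFwd nums)
          (0, PySem.List.pyGetD nums 0 0)).1 ≠ 0 := by
        intro h
        rw [hrel3.mpr h] at hE
        simp at hE
      simp only [subSort_alt, if_neg hL1]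
      rw [if_neg hne]
      -- facts about E from the forward invariant
      obtain ⟨C1, C2, C3, C4⟩ := fwd_inv nums nums.length (by omega)
      obtain ⟨P1, t, ht1, htL, htM, htE⟩ := C4 E hE
      set tw := (nums.takeWhile (fun x => decide (x ≤ E))).length with htw
      have htwle : tw ≤ nums.length := takeWhile_len_le _ nums
      have hpropI : ∀ i : Int, 0 ≤ i → i < (tw : Int) → PySem.List.pyGetD nums i 0 ≤ E := by
        intro i h0 hi
        have h1 : i.toNat < tw := by omega
        have h2 := takeWhile_getD (fun x => decide (x ≤ E)) nums i.toNat h1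
        rw [decide_eq_true_eq] at h2
        have h3 : i = ((i.toNat : Nat) : Int) := by omega
        rw [h3, PySem.List.pyGetD_natCast]
        exact h2
      have htwt : (tw : Int) < t := by
        by_contra hcon
        obtain ⟨i, hi0, hit, hlt⟩ := htM
        have := hpropI i hi0 (by omega)
        omega
      have htwlt : tw < nums.length := by omega
      have hstopI : E < PySem.List.pyGetD nums (tw : Int) 0 := by
        have h2 := takeWhile_stop (fun x => decide (x ≤ E)) nums htwlt
        rw [← htw, decide_eq_false_iff_not] at h2
        rw [PySem.List.pyGetD_natCast]
        omega
      have hb : ∀ i j : Int, 0 ≤ i → i < (tw : Int) → i < j → j < (nums.length : Int) →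
          PySem.List.pyGetD nums i 0 ≤ PySem.List.pyGetD nums j 0 := by
        intro i j h0 hitw hij hjL
        by_contra hcon
        rw [not_le] at hcon
        have hMj : Misp nums j := ⟨i, h0, hij, hcon⟩
        have hEj := P1 j (by omega) hjL hMj
        have := hpropI i h0 hitw
        omega
      have hwhile : subSortWhile nums E nums.length 0 = (tw : Int) := by
        have h := while_eq nums E nums.length 0 (by omega) (by omega)
        rw [← htw] at h
        simpa using h
      have hsplit2 : PySem.List.pyRange ((nums.length : Int) - 2) (-1) (-1) =
          PySem.List.pyRange ((nums.length : Int) - 2) (tw : Int) (-1) ++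
          PySem.List.pyRange (tw : Int) (-1) (-1) :=
        bw_split _ _ _ (by omega) (by omega)
      have hbw : ((PySem.List.pyRange ((nums.length : Int) - 2) (-1) (-1)).foldl (subSortBwd nums)
          (0, PySem.List.pyGetD nums ((nums.length : Int) - 1) 0)).1 = (tw : Int) := by
        rw [hsplit2, List.foldl_append]
        obtain ⟨hz1, hz2, hz3⟩ := bw_minv nums ((nums.length : Int) - 2 - tw).toNat
          ((nums.length : Int) - 2) (tw : Int) (by omega) 0
          (PySem.List.pyGetD nums ((nums.length : Int) - 1) 0)
        set z := (PySem.List.pyRange ((nums.length : Int) - 2) (tw : Int) (-1)).foldl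
          (subSortBwd nums) (0, PySem.List.pyGetD nums ((nums.length : Int) - 1) 0) with hz
        have hzE : z.2 ≤ E := by
          rcases lt_or_eq_of_le (by omega : t ≤ (nums.length : Int) - 1) with h | h
          · have := hz2 t htwt (by omega); omega
          · rw [← htE, h]; exact hz1
        have hfirst : (PySem.List.pyRange (tw : Int) (-1) (-1)).foldl (subSortBwd nums) z =
            (PySem.List.pyRange ((tw : Int) - 1) (-1) (-1)).foldl (subSortBwd nums)
              ((tw : Int), z.2) := by
          rw [PySem.List.pyRange_neg_one_cons (by omega : (-1:Int) < (tw : Int)), List.foldl_cons]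
          have hcond : PySem.List.pyGetD nums (tw : Int) 0 > z.2 := by omega
          simp only [subSortBwd]
          rw [if_pos hcond]
        rw [hfirst]
        refine bw_nofire nums tw ((tw : Int) - 1) (-1) (by omega) (tw : Int) z.2 ?_
        intro i hi1 hi2
        constructor
        · rcases hz3 with h | ⟨j, hj1, hj2, hj3⟩
          · rw [h]; exact hb i ((nums.length : Int) - 1) (by omega) (by omega) (by omega) (by omega)
          · rw [hj3]; exact hb i j (by omega) (by omega) (by omega) (by omega)
        · intro j hij hjtw
          exact hb i j (by omega) (by omega) hij (by omega)
      rw [hwhile, hbw, hrel1]
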